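-- pv_equiv track=rewrite | github.com/fatihersoy0211/AI-Response | backend/app/store.py | _split_sources
-- ===== SOURCE A (Python) =====
-- from typing import Any
--
-- def _split_sources(project: dict[str, Any]) -> tuple[list[dict[str, Any]], list[dict[str, Any]]]:
--     """
--     Return (docs, transcripts) from typed subcollections.
--     Falls back to migrating old flat `sources` list for backward compatibility.
--     """
--     docs = project.get("documents", [])
--     transcripts = project.get("transcripts", [])
--
--     # Backward migration: classify any items still in the flat sources list
--     legacy_sources = project.get("sources", [])
--     if legacy_sources:
--         for src in legacy_sources:
--             src_type = src.get("source_type", "text")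
--             if src_type == "transcript":
--                 transcripts = transcripts + [src]
--             else:
--                 docs = docs + [src]
--
--     return docs, transcripts
-- ===== SOURCE B (Python) =====
-- from typing import Any
--
-- def _split_sources(project: dict[str, Any]) -> tuple[list[dict[str, Any]], list[dict[str, Any]]]:
--     docs = project.get("documents", [])
--     transcripts = project.get("transcripts", [])
--
--     legacy_sources = project.get("sources", [])
--     if legacy_sources:
--         # Stable sort by the boolean "is transcript" key: non-transcripts come
--         # first, each block keeping its original relative order (stability).
--         tagged = sorted(
--             ((src.get("source_type", "text") == "transcript", src) for src in legacy_sources),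
--             key=lambda p: p[0],
--         )
--         k = sum(not flag for flag, _ in tagged)  # number of non-transcripts
--         docs = docs + [src for _, src in tagged[:k]]
--         transcripts = transcripts + [src for _, src in tagged[k:]]
--
--     return docs, transcripts
-- ===== Notes on version B (the rewrite author's own statement) =====
-- stated objective: alternative
-- what changed: Replaces A's single classifying loop with repeated list concatenation by a stable sort of the tagged legacy items on the boolean is-transcript key followed by a split of the sorted list at the count of non-transcripts; stability preserves each class's original order.
import Mathlib
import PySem

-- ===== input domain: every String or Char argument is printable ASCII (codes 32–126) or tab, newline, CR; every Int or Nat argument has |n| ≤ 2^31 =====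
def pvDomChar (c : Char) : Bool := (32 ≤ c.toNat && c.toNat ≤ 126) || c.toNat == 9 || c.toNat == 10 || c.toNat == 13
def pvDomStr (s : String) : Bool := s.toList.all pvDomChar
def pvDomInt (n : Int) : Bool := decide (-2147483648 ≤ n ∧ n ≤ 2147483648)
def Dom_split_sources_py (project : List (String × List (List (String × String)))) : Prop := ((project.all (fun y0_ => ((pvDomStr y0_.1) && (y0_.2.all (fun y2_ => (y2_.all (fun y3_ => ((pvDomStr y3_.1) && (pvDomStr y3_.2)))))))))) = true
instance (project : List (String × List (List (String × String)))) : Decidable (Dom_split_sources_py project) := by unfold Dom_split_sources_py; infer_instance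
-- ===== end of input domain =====

-- B replaces A's classifying loop by a stable sort on the boolean is-transcript key followed by a split at the count of non-transcripts: an alternative algorithm, no behaviour change.

-- dict.get(k, dflt) on an association list: first match wins (Python dict lookup under the type convention)
def pvAssocGetD {α : Type} (xs : List (String × α)) (k : String) (dflt : α) : α :=
  match xs with
  | [] => dflt
  | (a, b) :: rest => if a == k then b else pvAssocGetD rest k dflt

-- ===== PORT A =====
def split_sources_py (project : List (String × List (List (String × String)))) : (List (List (String × String))) × (List (List (String × String))) :=
  let docs := pvAssocGetD project "documents" []
  let transcripts := pvAssocGetD project "transcripts" []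
  let legacy_sources := pvAssocGetD project "sources" []
  if legacy_sources = [] then (docs, transcripts)
  else
    legacy_sources.foldl
      (fun (st : (List (List (String × String))) × (List (List (String × String)))) src =>
        if pvAssocGetD src "source_type" "text" == "transcript"
        then (st.1, st.2 ++ [src])
        else (st.1 ++ [src], st.2))
      (docs, transcripts)

-- ===== PORT B =====
-- tagged[:k] / tagged[k:] with 0 ≤ k ≤ len(tagged) are exactly take/drop;
-- sum(not flag for …) is the count of pairs whose flag is false (countP).
def split_sources_py_alt (project : List (String × List (List (String × String)))) : (List (List (String × String))) × (List (List (String × String))) :=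
  let docs := pvAssocGetD project "documents" []
  let transcripts := pvAssocGetD project "transcripts" []
  let legacy_sources := pvAssocGetD project "sources" []
  if legacy_sources = [] then (docs, transcripts)
  else
    let tagged := PySem.List.sorted
      (legacy_sources.map (fun src => (pvAssocGetD src "source_type" "text" == "transcript", src)))
      (fun p => p.1) false
    let k := tagged.countP (fun p => !p.1)
    (docs ++ (tagged.take k).map (·.2), transcripts ++ (tagged.drop k).map (·.2))

-- ===== PRECONDITION & SPEC =====
def Spec_split_sources_py (project : List (String × List (List (String × String)))) (out : (List (List (String × String))) × (List (List (String × String)))) : Prop := out = split_sources_py_alt project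
instance (project : List (String × List (List (String × String)))) (out : (List (List (String × String))) × (List (List (String × String)))) : Decidable (Spec_split_sources_py project out) := by unfold Spec_split_sources_py; infer_instance

-- ===== CLAIM (what is proved, stated in full; the proofs are below) =====
def Claim_equal_split_sources_py : Prop := ∀ (project : List (String × List (List (String × String)))), Dom_split_sources_py project → Spec_split_sources_py project (split_sources_py project)

-- ===== LEMMAS AND PROOFS =====

-- Inserting x into F ++ T when x goes after all of F and before all of T lands it exactly between them.
theorem insertBy_mid {α : Type} (before : α → α → Bool) (x : α) (F T : List α)
    (hF : ∀ y ∈ F, before x y = false) (hT : ∀ y ∈ T, before x y = true) :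
    PySem.List.insertBy before x (F ++ T) = F ++ x :: T := by
  induction F with
  | nil =>
    cases T with
    | nil => simp [PySem.List.insertBy]
    | cons t ts => simp [PySem.List.insertBy, hT t (by simp)]
  | cons f fs ih =>
    have hf : before x f = false := hF f (by simp)
    simp [PySem.List.insertBy, hf, ih (fun y hy => hF y (by simp [hy]))]

-- The insertion-sort fold over (Bool × α) pairs, started from a false-block ++ true-block,
-- appends each class's items in order: the stable partition.
theorem foldl_ins_partition {α : Type} (m F T : List (Bool × α))
    (hF : ∀ p ∈ F, p.1 = false) (hT : ∀ p ∈ T, p.1 = true) :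
    m.foldl (fun acc x => PySem.List.insertBy
        (fun a b => decide ((a.1 : Bool) < b.1)) x acc) (F ++ T)
      = (F ++ m.filter (fun p => !p.1)) ++ (T ++ m.filter (fun p => p.1)) := by
  induction m generalizing F T with
  | nil => simp
  | cons x xs ih =>
    simp only [List.foldl_cons, List.filter_cons]
    cases hx : x.1 with
    | false =>
      have h1 : PySem.List.insertBy (fun a b => decide ((a.1 : Bool) < b.1)) x (F ++ T)
          = (F ++ [x]) ++ T := by
        rw [insertBy_mid]
        · simp
        · intro y hy; simp [hx, hF y hy]
        · intro y hy; simp [hx, hT y hy, Bool.lt_iff]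
      have hF' : ∀ p ∈ F ++ [x], p.1 = false := by
        intro p hp
        rcases List.mem_append.1 hp with hpF | hpx
        · exact hF p hpF
        · simp at hpx; simp [hpx, hx]
      rw [h1, ih (F ++ [x]) T hF' hT]
      simp [List.append_assoc]
    | true =>
      have h1 : PySem.List.insertBy (fun a b => decide ((a.1 : Bool) < b.1)) x (F ++ T)
          = F ++ (T ++ [x]) := by
        have := insertBy_mid (fun a b => decide ((a.1 : Bool) < b.1)) x (F ++ T) []
          (by intro y hy
              rcases List.mem_append.1 hy with hyF | hyT
              · simp [hx, hF y hyF, Bool.lt_iff]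
              · simp [hx, hT y hyT])
          (by intro y hy; exact absurd hy (by simp))
        simpa [List.append_assoc] using this
      have hT' : ∀ p ∈ T ++ [x], p.1 = true := by
        intro p hp
        rcases List.mem_append.1 hp with hpT | hpx
        · exact hT p hpT
        · simp at hpx; simp [hpx, hx]
      rw [h1, ih F (T ++ [x]) hF hT']
      simp [List.append_assoc]

-- Stable sort by a Bool key is the partition: false-keyed items first, each block in original order.
theorem sorted_bool_key_eq_partition {α : Type} (m : List (Bool × α)) :
    PySem.List.sorted m (fun p => p.1) false
      = m.filter (fun p => !p.1) ++ m.filter (fun p => p.1) := by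
  rw [PySem.List.sorted_eq_foldl_insertBy]
  simpa using foldl_ins_partition m [] [] (by simp) (by simp)

-- A's loop, starting from (d, t), appends the non-transcript items to d and the transcript items to t, in order.
theorem split_loop_eq (l : List (List (String × String)))
    (d t : List (List (String × String))) :
    l.foldl
      (fun (st : (List (List (String × String))) × (List (List (String × String)))) src =>
        if pvAssocGetD src "source_type" "text" == "transcript"
        then (st.1, st.2 ++ [src])
        else (st.1 ++ [src], st.2))
      (d, t)
    = ( d ++ l.filter (fun src => !(pvAssocGetD src "source_type" "text" == "transcript"))
      , t ++ l.filter (fun src => pvAssocGetD src "source_type" "text" == "transcript") ) := by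
  induction l generalizing d t with
  | nil => simp
  | cons x xs ih =>
    simp only [List.foldl_cons, List.filter_cons]
    cases h : (pvAssocGetD x "source_type" "text" == "transcript") <;>
      simp only [h, Bool.not_false, Bool.not_true, if_false, if_true, Bool.false_eq_true,
        ih, List.append_assoc, List.singleton_append]

-- ===== VERDICT (by name: the statement is the Claim_ definition above) =====
theorem split_sources_py_spec : Claim_equal_split_sources_py := by
  intro project _
  unfold Spec_split_sources_py split_sources_py split_sources_py_alt
  dsimp only []
  by_cases h : pvAssocGetD project "sources" ([] : List (List (String × String))) = []
  · rw [if_pos h, if_pos h]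
  · rw [if_neg h, if_neg h, split_loop_eq]
    set l := pvAssocGetD project "sources" ([] : List (List (String × String)))
    set tag := fun src : List (String × String) =>
      ((pvAssocGetD src "source_type" "text" == "transcript"), src)
    have hsort : PySem.List.sorted (l.map tag) (fun p => p.1) false
        = (l.filter (fun s => !(tag s).1)).map tag ++ (l.filter (fun s => (tag s).1)).map tag := by
      rw [sorted_bool_key_eq_partition, List.filter_map, List.filter_map]
      rfl
    rw [hsort]
    have hk : ((l.filter (fun s => !(tag s).1)).map tag
        ++ (l.filter (fun s => (tag s).1)).map tag).countP (fun p => !p.1)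
        = ((l.filter (fun s => !(tag s).1)).map tag).length := by
      rw [List.countP_append]
      have h1 : ((l.filter (fun s => !(tag s).1)).map tag).countP (fun p => !p.1)
          = ((l.filter (fun s => !(tag s).1)).map tag).length := by
        apply List.countP_eq_length.2
        intro p hp
        rcases List.mem_map.1 hp with ⟨s, hs, rfl⟩
        simpa using List.of_mem_filter hs
      have h2 : ((l.filter (fun s => (tag s).1)).map tag).countP (fun p => !p.1) = 0 := by
        apply List.countP_eq_zero.2
        intro p hp
        rcases List.mem_map.1 hp with ⟨s, hs, rfl⟩
        simpa using List.of_mem_filter hs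
      rw [h1, h2]
      simp
    rw [hk, List.take_left, List.drop_left]
    simp [tag, List.map_map, Function.comp_def]
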